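-- pv_equiv track=rewrite | github.com/theguyoverthere/CMU15-112-Spring17 | src/Week2/Practice/wk2_practice.py | nthHappyNumber
-- ===== SOURCE A (Python) =====
-- def sumOfSquaresOfDigits(n):
--     sumSquare = 0
--
--     while n > 0:
--         nthDigit = n % 10
--         sumSquare += (nthDigit ** 2)
--
--         n //= 10
--
--     return sumSquare
--
-- def isHappyNumber(n):
--
--     if   n <= 0: return False
--     if   n == 1: return True
--     elif n == 4: return False # Special Case
--
--     while True:
--         if (n == 1) or (n == 4): break
--         n = sumOfSquaresOfDigits(n)
--     return n == 1
--
-- def nthHappyNumber(n):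
--     guess = 0
--     found = -1
--     while found < n:
--         guess += 1
--         if isHappyNumber(guess):
--             found += 1
--
--     return guess
-- ===== SOURCE B (Python) =====
-- def sumOfSquaresOfDigits(n):
--     sumSquare = 0
--     while n > 0:
--         nthDigit = n % 10
--         sumSquare += (nthDigit ** 2)
--         n //= 10
--     return sumSquare
--
-- def nthHappyNumber(n):
--     guess = 0
--     found = -1
--     while found < n:
--         guess += 1
--         # happiness by cycle detection: follow the digit-square trajectory,
--         # tracking visited values in a set; happy iff it reaches 1 before
--         # any value repeats (no hardcoded unhappy-cycle sentinel)
--         seen = set()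
--         m = guess
--         while m != 1 and m not in seen:
--             seen.add(m)
--             m = sumOfSquaresOfDigits(m)
--         if m == 1:
--             found += 1
--     return guess
-- ===== Notes on version B (the rewrite author's own statement) =====
-- stated objective: idiomatic
-- what changed: The happiness test drops A's hardcoded unhappy-cycle sentinel constant and its special-case ladder: B follows each candidate's digit-square trajectory while maintaining a set of visited values, declaring the candidate happy when the trajectory reaches the fixed point one and unhappy as soon as a value repeats (generic cycle detection).
import Mathlib
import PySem

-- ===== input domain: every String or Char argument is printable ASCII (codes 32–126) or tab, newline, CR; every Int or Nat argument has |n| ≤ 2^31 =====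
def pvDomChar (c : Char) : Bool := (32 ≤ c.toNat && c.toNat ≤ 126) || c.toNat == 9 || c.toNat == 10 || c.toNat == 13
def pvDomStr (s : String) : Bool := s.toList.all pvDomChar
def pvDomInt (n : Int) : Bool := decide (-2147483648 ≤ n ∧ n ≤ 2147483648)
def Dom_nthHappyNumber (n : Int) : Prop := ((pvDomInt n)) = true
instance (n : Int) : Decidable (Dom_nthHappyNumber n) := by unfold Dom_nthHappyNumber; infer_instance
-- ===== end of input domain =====

-- B drops A's hardcoded '== 4' unhappy-cycle sentinel: each candidate's digit-square
-- trajectory is followed with a set of visited values, happy when it reaches 1, unhappy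
-- as soon as a value repeats (generic cycle detection; objective: idiomatic, no speed claim).

-- ===== PORT A =====
-- shared helper: Python's sumOfSquaresOfDigits (identical code in Source A and Source B);
-- the while loop is ported with fuel n.toNat, which exceeds the digit count of any n ≥ 1.
def sumsqGo : Nat → Int → Int → Int
  | 0, _, acc => acc
  | k+1, n, acc =>
    if 0 < n then sumsqGo k (PySem.Int.floordiv n 10) (acc + (PySem.Int.mod n 10)^2)
    else acc

def sumSq (n : Int) : Int := sumsqGo n.toNat n 0

-- A's 'while True: if n==1 or n==4: break; n = sumOfSquaresOfDigits(n)' with fuel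
-- (fuel n.toNat + 2000 is proved sufficient below; on admitted inputs it never runs out).
def happyLoopA : Nat → Int → Bool
  | 0, n => n == 1
  | k+1, n => if n == 1 || n == 4 then n == 1 else happyLoopA k (sumSq n)

def isHappyA (n : Int) : Bool :=
  if n ≤ 0 then false
  else if n == 1 then true
  else if n == 4 then false
  else happyLoopA (n.toNat + 2000) n

def outerA : Nat → Int → Int → Int → Int
  | 0, _, guess, _ => guess
  | k+1, n, guess, found =>
    if found < n then
      outerA k n (guess + 1) (if isHappyA (guess + 1) then found + 1 else found)
    else guess

def nthHappyNumber (n : Int) : Int := outerA ((n.toNat + 2) * 1000) n 0 (-1)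

-- ===== PORT B =====
-- B's inner 'while m != 1 and m not in seen: seen.add(m); m = sumOfSquaresOfDigits(m)'
-- with fuel (fuel g.toNat + 2000 is proved sufficient below: the visited set has no
-- duplicates and its values are bounded, so the loop always exits within the fuel).
def seenGo : Nat → PySem.Set Int → Int → Int
  | 0, _, m => m
  | k+1, seen, m =>
    if m != 1 && !(PySem.Set.contains seen m) then seenGo k (PySem.Set.add seen m) (sumSq m)
    else m

-- B's outer 'while found < n' loop: count a guess when its trajectory ended at 1
def outerB : Nat → Int → Int → Int → Int
  | 0, _, guess, _ => guess
  | k+1, n, guess, found =>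
    if found < n then
      outerB k n (guess + 1)
        (if seenGo ((guess + 1).toNat + 2000) PySem.Set.empty (guess + 1) == 1 then found + 1 else found)
    else guess

def nthHappyNumber_alt (n : Int) : Int := outerB ((n.toNat + 2) * 1000) n 0 (-1)

-- ===== PRECONDITION & SPEC =====
def Spec_nthHappyNumber (n : Int) (out : Int) : Prop := out = nthHappyNumber_alt n
instance (n : Int) (out : Int) : Decidable (Spec_nthHappyNumber n out) := by unfold Spec_nthHappyNumber; infer_instance

-- ===== CLAIM (what is proved, stated in full; the proofs are below) =====
def Claim_equal_nthHappyNumber : Prop := ∀ (n : Int), Dom_nthHappyNumber n → Spec_nthHappyNumber n (nthHappyNumber n)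

-- ===== LEMMAS AND PROOFS =====

lemma sumsqGo_nonpos (k : Nat) (n acc : Int) (h : n ≤ 0) : sumsqGo k n acc = acc := by
  cases k with
  | zero => rfl
  | succ k => simp only [sumsqGo]; rw [if_neg (by omega)]

lemma sumsqGo_acc (k : Nat) : ∀ (n acc : Int), sumsqGo k n acc = acc + sumsqGo k n 0 := by
  induction k with
  | zero => intro n acc; simp [sumsqGo]
  | succ k ih =>
    intro n acc
    by_cases h : 0 < n
    · simp only [sumsqGo, if_pos h]
      rw [ih (PySem.Int.floordiv n 10) (acc + (PySem.Int.mod n 10)^2),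
          ih (PySem.Int.floordiv n 10) (0 + (PySem.Int.mod n 10)^2)]
      ring
    · simp only [sumsqGo, if_neg h]; ring

lemma floordiv_ten_lt (n : Int) (h : 0 < n) :
    (PySem.Int.floordiv n 10).toNat < n.toNat ∧ 0 ≤ PySem.Int.floordiv n 10 := by
  rw [PySem.Int.floordiv_eq_ediv_of_pos (by norm_num)]
  omega

lemma sumsqGo_fuel : ∀ (t : Nat) (n : Int), n.toNat = t →
    ∀ k : Nat, t ≤ k → sumsqGo k n 0 = sumsqGo t n 0 := by
  intro t
  induction t using Nat.strong_induction_on with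
  | _ t ih =>
    intro n ht k hk
    by_cases h : 0 < n
    · have hq := floordiv_ten_lt n h
      obtain ⟨t', rfl⟩ : ∃ t', t = t' + 1 := ⟨t - 1, by omega⟩
      obtain ⟨k', rfl⟩ : ∃ k', k = k' + 1 := ⟨k - 1, by omega⟩
      simp only [sumsqGo, if_pos h]
      rw [sumsqGo_acc k', sumsqGo_acc t',
        ih (PySem.Int.floordiv n 10).toNat (by omega) _ rfl k' (by omega),
        ih (PySem.Int.floordiv n 10).toNat (by omega) _ rfl t' (by omega)]
    · rw [sumsqGo_nonpos k n 0 (by omega), sumsqGo_nonpos t n 0 (by omega)]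

lemma sumSq_unfold (n : Int) (h : 0 < n) :
    sumSq n = (PySem.Int.mod n 10)^2 + sumSq (PySem.Int.floordiv n 10) := by
  have hq := floordiv_ten_lt n h
  have ht : n.toNat = (n.toNat - 1) + 1 := by omega
  unfold sumSq
  rw [ht]
  simp only [sumsqGo, if_pos h]
  rw [sumsqGo_acc, sumsqGo_fuel (PySem.Int.floordiv n 10).toNat _ rfl (n.toNat - 1) (by omega)]
  ring

lemma sumSq_nonpos (n : Int) (h : n ≤ 0) : sumSq n = 0 := by
  unfold sumSq; exact sumsqGo_nonpos _ _ _ h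

lemma mod_ten_bounds (n : Int) : 0 ≤ PySem.Int.mod n 10 ∧ PySem.Int.mod n 10 ≤ 9 := by
  rw [PySem.Int.mod_eq_emod_of_pos (by norm_num)]; omega

lemma sq_le_81 (r : Int) (h0 : 0 ≤ r) (h9 : r ≤ 9) : r^2 ≤ 81 := by nlinarith

lemma sumSq_nonneg : ∀ (t : Nat) (n : Int), n.toNat = t → 0 ≤ sumSq n := by
  intro t
  induction t using Nat.strong_induction_on with
  | _ t ih =>
    intro n ht
    by_cases h : 0 < n
    · have hq := floordiv_ten_lt n h
      have hr := mod_ten_bounds n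
      rw [sumSq_unfold n h]
      have := ih (PySem.Int.floordiv n 10).toNat (by omega) _ rfl
      nlinarith
    · rw [sumSq_nonpos n (by omega)]

lemma sumSq_pos : ∀ (t : Nat) (n : Int), n.toNat = t → 1 ≤ n → 1 ≤ sumSq n := by
  intro t
  induction t using Nat.strong_induction_on with
  | _ t ih =>
    intro n ht hn
    have h : 0 < n := by omega
    have hq := floordiv_ten_lt n h
    have hr := mod_ten_bounds n
    have hdm := PySem.Int.floordiv_mul_add_mod n 10
    rw [sumSq_unfold n h]
    by_cases hr1 : 1 ≤ PySem.Int.mod n 10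
    · have := sumSq_nonneg (PySem.Int.floordiv n 10).toNat _ rfl
      nlinarith
    · have hq1 : 1 ≤ PySem.Int.floordiv n 10 := by nlinarith
      have := ih (PySem.Int.floordiv n 10).toNat (by omega) _ rfl hq1
      nlinarith

-- small-range facts, checked by computation
set_option maxRecDepth 100000 in
lemma sumSq_le_162_small : ∀ j : Nat, j < 100 → sumSq (j : Int) ≤ 162 := by decide

set_option maxRecDepth 400000 in
lemma sumSq_lt_self_mid : ∀ j : Nat, j < 244 → 100 ≤ j → sumSq (j : Int) < (j : Int) := by decide

lemma sumSq_lt_self (q : Int) (hq : 100 ≤ q) : sumSq q < q := by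
  have H : ∀ t : Nat, ∀ q : Int, q.toNat = t → 100 ≤ q → sumSq q < q := by
    intro t
    induction t using Nat.strong_induction_on with
    | _ t ih =>
      intro q ht hq
      have h : 0 < q := by omega
      have hd := floordiv_ten_lt q h
      have hr := mod_ten_bounds q
      have hdm := PySem.Int.floordiv_mul_add_mod q 10
      have hr81 := sq_le_81 _ hr.1 hr.2
      have hsplit := sumSq_unfold q h
      by_cases hq100 : 100 ≤ PySem.Int.floordiv q 10
      · have := ih (PySem.Int.floordiv q 10).toNat (by omega) _ rfl hq100
        nlinarith
      · have hle : sumSq (PySem.Int.floordiv q 10) ≤ 162 := by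
          have hcast : ((PySem.Int.floordiv q 10).toNat : Int) = PySem.Int.floordiv q 10 := by
            omega
          have := sumSq_le_162_small (PySem.Int.floordiv q 10).toNat (by omega)
          rwa [hcast] at this
        by_cases hq244 : 244 ≤ q
        · nlinarith
        · have hcast : ((q.toNat : Nat) : Int) = q := by omega
          have hmid := sumSq_lt_self_mid q.toNat (by omega) (by omega)
          rwa [hcast] at hmid
  exact H q.toNat q rfl hq

-- the proof-side settling loop: iterate sumSq until a single digit remains
def happyLoopS : Nat → Int → Int
  | 0, n => n
  | k+1, n => if 10 ≤ n then happyLoopS k (sumSq n) else n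

-- semantic happiness: the settled single digit is 1 or 7
def isHappySem (n : Int) : Bool :=
  (happyLoopS (n.toNat + 1000) n == 1) || (happyLoopS (n.toNat + 1000) n == 7)

lemma happyLoopS_small (k : Nat) (m : Int) (h : m < 10) : happyLoopS k m = m := by
  cases k with
  | zero => rfl
  | succ k => simp only [happyLoopS]; rw [if_neg (by omega)]

lemma happyLoopS_stable : ∀ (k : Nat) (m : Int) (j : Nat),
    happyLoopS k m < 10 → happyLoopS (k + j) m = happyLoopS k m := by
  intro k
  induction k with
  | zero =>
    intro m j h
    simp only [happyLoopS] at h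
    rw [Nat.zero_add, happyLoopS_small j m h]; rfl
  | succ k ih =>
    intro m j h
    by_cases hm : (10:Int) ≤ m
    · simp only [happyLoopS, if_pos hm] at h ⊢
      have : k + 1 + j = (k + j) + 1 := by omega
      rw [this]
      simp only [happyLoopS, if_pos hm]
      exact ih (sumSq m) j h
    · have : k + 1 + j = (k + j) + 1 := by omega
      rw [this, happyLoopS_small _ m (by omega)]
      simp [happyLoopS, hm]

set_option maxRecDepth 1000000 in
lemma happyLoopS_region : ∀ j : Nat, j < 243 → happyLoopS 1000 ((j : Int) + 1) < 10 := by decide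

lemma happyLoopS_suff (m : Int) (hm : 1 ≤ m) : happyLoopS (m.toNat + 1000) m < 10 := by
  have H : ∀ t : Nat, ∀ m : Int, m.toNat = t → 1 ≤ m → happyLoopS (m.toNat + 1000) m < 10 := by
    intro t
    induction t using Nat.strong_induction_on with
    | _ t ih =>
      intro m ht hm
      by_cases h243 : m ≤ 243
      · have hcast : ((m.toNat - 1 : Nat) : Int) + 1 = m := by omega
        have h1000 : happyLoopS 1000 m < 10 := by
          have := happyLoopS_region (m.toNat - 1) (by omega)
          rwa [hcast] at this
        have := happyLoopS_stable 1000 m m.toNat h1000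
        rw [Nat.add_comm m.toNat 1000]
        rw [this]; exact h1000
      · have h100 : (100:Int) ≤ m := by omega
        have hlt := sumSq_lt_self m h100
        have hpos := sumSq_pos m.toNat m rfl hm
        have hrec := ih (sumSq m).toNat (by omega) _ rfl hpos
        have h10 : (10:Int) ≤ m := by omega
        obtain ⟨k', hk'⟩ : ∃ k', m.toNat + 1000 = k' + 1 := ⟨m.toNat + 999, by omega⟩
        rw [hk']
        simp only [happyLoopS, if_pos h10]
        obtain ⟨j, hj⟩ : ∃ j : Nat, k' = ((sumSq m).toNat + 1000) + j := ⟨k' - ((sumSq m).toNat + 1000), by omega⟩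
        rw [hj, happyLoopS_stable _ _ _ hrec]
        exact hrec
  exact H m.toNat m rfl hm

-- A's loop: once it has hit 1 or 4 the result is fuel-independent
def hitA : Nat → Int → Bool
  | 0, _ => false
  | k+1, m => if m == 1 || m == 4 then true else hitA k (sumSq m)

lemma happyLoopA_stable : ∀ (k : Nat) (m : Int) (j : Nat),
    hitA k m = true → happyLoopA (k + j) m = happyLoopA k m := by
  intro k
  induction k with
  | zero => intro m j h; simp [hitA] at h
  | succ k ih =>
    intro m j h
    have hkj : k + 1 + j = (k + j) + 1 := by omega
    by_cases hm : (m == 1 || m == 4) = true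
    · rw [hkj]; simp only [happyLoopA, if_pos hm]
    · simp only [hitA, if_neg hm] at h
      rw [hkj]
      simp only [happyLoopA, if_neg hm]
      exact ih (sumSq m) j h

set_option maxRecDepth 400000 in
lemma happyLoopA_digit : ∀ j : Nat, j < 9 →
    happyLoopA 1000 ((j : Int) + 1) = (((j : Int) + 1 == 1) || ((j : Int) + 1 == 7)) := by decide

set_option maxRecDepth 400000 in
lemma hitA_digit : ∀ j : Nat, j < 9 → hitA 1000 ((j : Int) + 1) = true := by decide

lemma happyLoopA_succ (k : Nat) (m : Int) :
    happyLoopA (k+1) m = if m == 1 || m == 4 then m == 1 else happyLoopA k (sumSq m) := rfl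

lemma happyLoopS_succ (k : Nat) (m : Int) :
    happyLoopS (k+1) m = if 10 ≤ m then happyLoopS k (sumSq m) else m := rfl

-- the bridge: wherever the settling loop settles below 10 within k steps, A's loop (with
-- 1000 extra fuel) answers exactly 'the settled value is 1 or 7'
lemma bridge : ∀ (k : Nat) (m : Int), 1 ≤ m → happyLoopS k m < 10 →
    happyLoopA (k + 1000) m = ((happyLoopS k m == 1) || (happyLoopS k m == 7)) := by
  intro k
  induction k with
  | zero =>
    intro m hm h
    simp only [happyLoopS] at h ⊢
    have hcast : ((m.toNat - 1 : Nat) : Int) + 1 = m := by omega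
    have := happyLoopA_digit (m.toNat - 1) (by omega)
    rw [hcast] at this
    rw [Nat.zero_add]
    exact this
  | succ k ih =>
    intro m hm h
    by_cases hm10 : (10:Int) ≤ m
    · have hne : (m == 1 || m == 4) = false := by
        simp only [Bool.or_eq_false_iff, beq_eq_false_iff_ne]; omega
      have hB : happyLoopS (k+1) m = happyLoopS k (sumSq m) := by
        rw [happyLoopS_succ, if_pos hm10]
      rw [hB] at h ⊢
      have hstep : k + 1 + 1000 = (k + 1000) + 1 := by omega
      rw [hstep, happyLoopA_succ, hne]
      simp only [Bool.false_eq_true, if_false]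
      exact ih (sumSq m) (sumSq_pos m.toNat m rfl hm) h
    · rw [happyLoopS_small _ m (by omega)]
      have hcast : ((m.toNat - 1 : Nat) : Int) + 1 = m := by omega
      have hhit := hitA_digit (m.toNat - 1) (by omega)
      rw [hcast] at hhit
      have hA := happyLoopA_digit (m.toNat - 1) (by omega)
      rw [hcast] at hA
      have : k + 1 + 1000 = 1000 + (k + 1) := by omega
      rw [this, happyLoopA_stable 1000 m (k+1) hhit]
      exact hA

lemma isHappy_eq (m : Int) : isHappyA m = isHappySem m := by
  by_cases h0 : m ≤ 0
  · have hB : happyLoopS (m.toNat + 1000) m = m := happyLoopS_small _ m (by omega)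
    simp only [isHappyA, if_pos h0, isHappySem, hB]
    have h1 : (m == 1) = false := by simp only [beq_eq_false_iff_ne]; omega
    have h7 : (m == 7) = false := by simp only [beq_eq_false_iff_ne]; omega
    rw [h1, h7]; rfl
  · have hm : 1 ≤ m := by omega
    by_cases h1 : m = 1
    · subst h1
      show isHappyA 1 = isHappySem 1
      unfold isHappySem
      rw [happyLoopS_small (((1:Int).toNat + 1000)) 1 (by norm_num)]
      rfl
    · by_cases h4 : m = 4
      · subst h4
        show isHappyA 4 = isHappySem 4
        unfold isHappySem
        rw [happyLoopS_small (((4:Int).toNat + 1000)) 4 (by norm_num)]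
        rfl
      · have hA : isHappyA m = happyLoopA (m.toNat + 2000) m := by
          simp only [isHappyA, if_neg h0]
          rw [if_neg (by simpa using h1), if_neg (by simpa using h4)]
        have hsuff := happyLoopS_suff m hm
        have hbridge := bridge (m.toNat + 1000) m hm hsuff
        have hfuel : m.toNat + 1000 + 1000 = m.toNat + 2000 := by omega
        rw [hfuel] at hbridge
        rw [hA, hbridge]
        rfl

-- ===== iterate theory for B's chain =====

def iterSq : Nat → Int → Int
  | 0, m => m
  | k+1, m => iterSq k (sumSq m)

lemma iterSq_add (b : Nat) : ∀ (a : Nat) (m : Int), iterSq (b + a) m = iterSq b (iterSq a m) := by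
  intro a
  induction a with
  | zero => intro m; rfl
  | succ a ih =>
    intro m
    have : b + (a + 1) = (b + a) + 1 := by omega
    rw [this]
    show iterSq (b + a) (sumSq m) = iterSq b (iterSq (a+1) m)
    rw [ih (sumSq m)]
    rfl

lemma iterSq_succ' (k : Nat) (m : Int) : iterSq (k + 1) m = sumSq (iterSq k m) := by
  have : k + 1 = 1 + k := by omega
  rw [this, iterSq_add 1 k m]
  rfl

lemma iterSq_pos (k : Nat) : ∀ (m : Int), 1 ≤ m → 1 ≤ iterSq k m := by
  induction k with
  | zero => intro m h; exact h
  | succ k ih => intro m h; exact ih (sumSq m) (sumSq_pos m.toNat m rfl h)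

lemma iterSq_le (g : Int) (hg : 1 ≤ g) : ∀ (k : Nat), iterSq k g ≤ max g 162 := by
  intro k
  induction k with
  | zero => exact le_max_left _ _
  | succ k ih =>
    rw [iterSq_succ']
    have hpos := iterSq_pos k g hg
    by_cases h100 : 100 ≤ iterSq k g
    · have := sumSq_lt_self (iterSq k g) h100
      omega
    · have hcast : (((iterSq k g).toNat : Nat) : Int) = iterSq k g := by omega
      have := sumSq_le_162_small (iterSq k g).toNat (by omega)
      rw [hcast] at this
      have : sumSq (iterSq k g) ≤ 162 := this
      exact le_trans this (le_max_right _ _)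

-- pigeonhole: a duplicate-free list of integers in [1, M] has at most M elements
lemma nodup_pos_bound (l : List Int) (M : Nat) (hnd : l.Nodup)
    (hb : ∀ x ∈ l, 1 ≤ x ∧ x ≤ (M : Int)) : l.length ≤ M := by
  have hinj : ∀ x ∈ l, ∀ y ∈ l, x.toNat = y.toNat → x = y := by
    intro x hx y hy h
    have := (hb x hx).1
    have := (hb y hy).1
    omega
  have hnd' : (l.map Int.toNat).Nodup := List.Nodup.map_on hinj hnd
  have hsub : (l.map Int.toNat).toFinset ⊆ Finset.Icc 1 M := by
    intro x hx
    simp only [List.mem_toFinset, List.mem_map] at hx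
    obtain ⟨y, hy, rfl⟩ := hx
    have := hb y hy
    simp only [Finset.mem_Icc]
    omega
  have hcard := Finset.card_le_card hsub
  rw [List.toFinset_card_of_nodup hnd', Nat.card_Icc] at hcard
  simpa using hcard

-- eventually periodic orbits stay among the first L iterates
lemma cycle_closure (g : Int) (L i : Nat) (hiL : i < L)
    (heq : iterSq L g = iterSq i g) : ∀ k : Nat, ∃ t, t < L ∧ iterSq k g = iterSq t g := by
  intro k
  induction k using Nat.strong_induction_on with
  | _ k ih =>
    by_cases hk : k < L
    · exact ⟨k, hk, rfl⟩
    · have hk' : k = (k - L) + L := by omega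
      have h1 : iterSq k g = iterSq ((k - L) + i) g := by
        conv_lhs => rw [hk']
        rw [iterSq_add (k - L) L g, heq, ← iterSq_add (k - L) i g]
      obtain ⟨t, ht, he⟩ := ih ((k - L) + i) (by omega)
      exact ⟨t, ht, by rw [h1, he]⟩

lemma happyLoopS_iter : ∀ (k : Nat) (m : Int), ∃ j : Nat, happyLoopS k m = iterSq j m := by
  intro k
  induction k with
  | zero => intro m; exact ⟨0, rfl⟩
  | succ k ih =>
    intro m
    by_cases h : (10:Int) ≤ m
    · obtain ⟨j, hj⟩ := ih (sumSq m)
      refine ⟨j + 1, ?_⟩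
      rw [happyLoopS_succ, if_pos h, hj]
      rfl
    · exact ⟨0, by rw [happyLoopS_succ, if_neg h]; rfl⟩

set_option maxRecDepth 100000 in
lemma iterSq_five_seven : iterSq 5 7 = 1 := by decide

lemma reaches_one (m : Int) (h : isHappySem m = true) : ∃ k : Nat, iterSq k m = 1 := by
  unfold isHappySem at h
  obtain ⟨j, hj⟩ := happyLoopS_iter (m.toNat + 1000) m
  rw [hj] at h
  rcases Bool.or_eq_true_iff.mp h with h1 | h7
  · exact ⟨j, by have := eq_of_beq h1; omega⟩
  · refine ⟨5 + j, ?_⟩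
    rw [iterSq_add 5 j m]
    have : iterSq j m = 7 := by have := eq_of_beq h7; omega
    rw [this, iterSq_five_seven]

lemma happyLoopS_eq_of_lt10 (k1 k2 : Nat) (m : Int)
    (h1 : happyLoopS k1 m < 10) (h2 : happyLoopS k2 m < 10) :
    happyLoopS k1 m = happyLoopS k2 m := by
  rcases Nat.le_total k1 k2 with h | h
  · obtain ⟨j, rfl⟩ : ∃ j, k2 = k1 + j := ⟨k2 - k1, by omega⟩
    rw [happyLoopS_stable k1 m j h1]
  · obtain ⟨j, rfl⟩ : ∃ j, k1 = k2 + j := ⟨k1 - k2, by omega⟩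
    rw [happyLoopS_stable k2 m j h2]

set_option maxRecDepth 400000 in
lemma isHappySem_sumSq_small : ∀ j : Nat, j < 9 →
    isHappySem (sumSq ((j : Int) + 1)) = isHappySem ((j : Int) + 1) := by decide

lemma isHappySem_sumSq (m : Int) (hm : 1 ≤ m) : isHappySem (sumSq m) = isHappySem m := by
  by_cases h10 : (10:Int) ≤ m
  · have hpos := sumSq_pos m.toNat m rfl hm
    have hA : happyLoopS (((sumSq m).toNat + 1000) + 1) m = happyLoopS ((sumSq m).toNat + 1000) (sumSq m) := by
      rw [happyLoopS_succ, if_pos h10]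
    have hs : happyLoopS ((sumSq m).toNat + 1000) (sumSq m) < 10 := happyLoopS_suff (sumSq m) hpos
    have hm' : happyLoopS (m.toNat + 1000) m < 10 := happyLoopS_suff m hm
    have heq : happyLoopS (m.toNat + 1000) m = happyLoopS ((sumSq m).toNat + 1000) (sumSq m) := by
      rw [happyLoopS_eq_of_lt10 (m.toNat + 1000) (((sumSq m).toNat + 1000) + 1) m hm' (by rw [hA]; exact hs), hA]
    unfold isHappySem
    rw [heq]
  · have hcast : ((m.toNat - 1 : Nat) : Int) + 1 = m := by omega
    have := isHappySem_sumSq_small (m.toNat - 1) (by omega)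
    rwa [hcast] at this

lemma isHappySem_iter (k : Nat) : ∀ (m : Int), 1 ≤ m → isHappySem (iterSq k m) = isHappySem m := by
  induction k with
  | zero => intro m _; rfl
  | succ k ih =>
    intro m hm
    show isHappySem (iterSq k (sumSq m)) = isHappySem m
    rw [ih (sumSq m) (sumSq_pos m.toNat m rfl hm), isHappySem_sumSq m hm]

-- ===== seen-loop characterisation =====

lemma seenGo_run : ∀ (fuel : Nat) (g m : Int) (seen : List Int),
    1 ≤ g →
    seen = (List.range seen.length).map (fun i => iterSq i g) →
    m = iterSq seen.length g →
    seen.Nodup →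
    (∀ c ∈ seen, c ≠ 1) →
    max g.toNat 162 + 1 ≤ seen.length + fuel →
    ((seenGo fuel seen m == 1) = isHappySem g) := by
  intro fuel
  induction fuel with
  | zero =>
    intro g m seen hg hshape hm hnd hne1 hfuel
    exfalso
    have hbound : seen.length ≤ max g.toNat 162 := by
      apply nodup_pos_bound seen (max g.toNat 162) hnd
      intro x hx
      rw [hshape] at hx
      simp only [List.mem_map, List.mem_range] at hx
      obtain ⟨i, _, rfl⟩ := hx
      constructor
      · exact iterSq_pos i g hg
      · have h1 := iterSq_le g hg i
        have h2 : max g 162 ≤ ((max g.toNat 162 : Nat) : Int) := by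
          rcases le_total g 162 with h | h
          · rw [max_eq_right h]
            have : (162 : Nat) ≤ max g.toNat 162 := le_max_right _ _
            omega
          · rw [max_eq_left h]
            have : g.toNat ≤ max g.toNat 162 := le_max_left _ _
            omega
        omega
    omega
  | succ fuel ih =>
    intro g m seen hg hshape hm hnd hne1 hfuel
    simp only [seenGo]
    by_cases hm1 : m = 1
    · rw [if_neg (by simp [hm1])]
      have : isHappySem g = isHappySem (iterSq seen.length g) := (isHappySem_iter _ g hg).symm
      rw [this, ← hm, hm1]
      decide
    · by_cases hmem : m ∈ seen
      · have hcond : (m != 1 && !(PySem.Set.contains seen m)) = false := by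
          have hc : PySem.Set.contains seen m = true := (PySem.Set.contains_iff seen m).mpr hmem
          simp only [hc]
          simp
        rw [if_neg (by rw [hcond]; simp)]
        -- cycle: the orbit of g repeats without reaching 1, so g is unhappy
        have hLpos : 0 < seen.length := List.length_pos_of_mem hmem
        obtain ⟨i, hiL, hieq⟩ : ∃ i, i < seen.length ∧ iterSq seen.length g = iterSq i g := by
          rw [hshape] at hmem
          rw [hm] at hmem
          simp only [List.mem_map, List.mem_range] at hmem
          obtain ⟨i, hi, he⟩ := hmem
          exact ⟨i, hi, he.symm⟩
        have hunhappy : isHappySem g = false := by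
          by_cases hH : isHappySem g = true
          · exfalso
            obtain ⟨k, hk⟩ := reaches_one g hH
            obtain ⟨t, ht, hte⟩ := cycle_closure g seen.length i hiL hieq k
            have h1mem : (1 : Int) ∈ seen := by
              rw [hshape]
              simp only [List.mem_map, List.mem_range]
              exact ⟨t, ht, by rw [← hte, hk]⟩
            exact hne1 1 h1mem rfl
          · simpa using hH
        rw [hunhappy]
        simp [hm1]
      · have hcond : (m != 1 && !(PySem.Set.contains seen m)) = true := by
          simp [bne_iff_ne, hm1]
          exact hmem
        rw [if_pos hcond]
        have hadd : PySem.Set.add seen m = seen ++ [m] := PySem.Set.add_of_not_mem hmem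
        rw [hadd]
        have hlen : (seen ++ [m]).length = seen.length + 1 := by simp
        apply ih g (sumSq m) (seen ++ [m]) hg
        · rw [hlen, List.range_succ, List.map_append, ← hshape, hm]; simp
        · rw [hlen, iterSq_succ', hm]
        · rw [List.nodup_append]
          refine ⟨hnd, List.nodup_singleton m, ?_⟩
          intro a ha b2 hb2 heq
          rw [List.mem_singleton] at hb2
          exact hmem ((heq.trans hb2) ▸ ha)
        · intro c hc
          rcases List.mem_append.mp hc with h | h
          · exact hne1 c h
          · simp only [List.mem_singleton] at h
            rw [h]; exact hm1
        · rw [hlen]; omega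

lemma outer_eq : ∀ (k : Nat) (n g fnd : Int), 0 ≤ g →
    outerA k n g fnd = outerB k n g fnd := by
  intro k
  induction k with
  | zero => intro n g fnd _; rfl
  | succ k ih =>
    intro n g fnd hg
    by_cases h : fnd < n
    · simp only [outerA, outerB, if_pos h]
      have hrun := seenGo_run ((g + 1).toNat + 2000) (g + 1) (g + 1) [] (by omega)
        (by simp) (by simp [iterSq]) List.nodup_nil (by simp) (by omega)
      rw [isHappy_eq, ← hrun]
      exact ih n (g + 1) _ (by omega)
    · simp only [outerA, outerB, if_neg h]

lemma main_eq (n : Int) : nthHappyNumber n = nthHappyNumber_alt n := by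
  unfold nthHappyNumber nthHappyNumber_alt
  exact outer_eq _ n 0 (-1) le_rfl

-- ===== VERDICT (by name: the statement is the Claim_ definition above) =====
theorem nthHappyNumber_spec : Claim_equal_nthHappyNumber := by
  intro n _
  unfold Spec_nthHappyNumber
  exact main_eq n
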